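-- pv_equiv track=rewrite | github.com/JWeonseok/Problem-Solving | Programmers/BP/BP_no.1.py | solution
-- ===== SOURCE A (Python) =====
-- def solution(answers):
--     answer = []
--     cnt = [0] * 3
--
--     student = [[1, 2, 3, 4, 5],
--     [2, 1, 2, 3, 2, 4, 2, 5],
--     [3, 3, 1, 1, 2, 2, 4, 4, 5, 5]]
--
--     for i in range(len(student)):
--         for j in range(len(answers)):
--             if answers[j] == student[i][j % len(student[i])]:
--                 cnt[i] += 1
--
--     for i in range(3):
--         if max(cnt) == cnt[i]:
--             answer.append(i+1)
--     return answer
-- ===== SOURCE B (Python) =====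
-- def solution(answers):
--     # Frequency index: one pass over answers builds a dict keyed by
--     # (index mod 40, value) -- 40 = lcm(5, 8, 10), so the residue mod 40
--     # determines each pattern's expected answer.  Scores are then read
--     # off the index with 40 lookups per student; answers is never rescanned.
--     freq = {}
--     for j, a in enumerate(answers):
--         key = (j % 40, a)
--         freq[key] = freq.get(key, 0) + 1
--     patterns = [[1, 2, 3, 4, 5],
--                 [2, 1, 2, 3, 2, 4, 2, 5],
--                 [3, 3, 1, 1, 2, 2, 4, 4, 5, 5]]
--     cnt = [sum(freq.get((k, p[k % len(p)]), 0) for k in range(40))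
--            for p in patterns]
--     best = max(cnt)
--     return [i + 1 for i in range(3) if cnt[i] == best]
-- ===== Notes on version B (the rewrite author's own statement) =====
-- stated objective: alternative
-- what changed: B replaces A's three pattern-vs-answers scans by a frequency index: one pass builds a dict keyed by (index mod 40, value) (40 = lcm of the pattern periods), each student's score is then read with 40 dictionary lookups instead of rescanning answers, and winners are selected by comparing to max(cnt).
import Mathlib
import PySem

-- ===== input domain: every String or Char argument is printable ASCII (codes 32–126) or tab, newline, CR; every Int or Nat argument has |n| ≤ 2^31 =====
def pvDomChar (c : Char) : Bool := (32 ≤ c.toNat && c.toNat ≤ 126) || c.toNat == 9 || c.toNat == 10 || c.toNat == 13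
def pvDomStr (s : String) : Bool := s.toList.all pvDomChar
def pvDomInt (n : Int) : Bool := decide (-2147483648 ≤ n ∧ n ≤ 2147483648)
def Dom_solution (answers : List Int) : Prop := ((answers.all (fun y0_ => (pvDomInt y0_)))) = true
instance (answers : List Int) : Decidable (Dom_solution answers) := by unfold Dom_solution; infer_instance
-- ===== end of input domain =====

-- B replaces A's three pattern scans of `answers` by a frequency index built in one pass
-- (a dict keyed by (index mod 40, value), 40 = lcm of the pattern periods); scores are read
-- off the index by 40 lookups per student (objective: alternative).

-- ===== PORT A =====
-- Port of A: for each student pattern, scan all answer indices and bump cnt[i];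
-- then collect i+1 for every cnt[i] equal to max(cnt).  pyGetD/pySetD are exact here:
-- every index A uses (j < len(answers), j % len(pattern), i < 3) is in range, so
-- the Python indexing never raises and the defaulted total forms compute the same values.
def solution (answers : List Int) : List Int :=
  let student : List (List Int) := [[1, 2, 3, 4, 5], [2, 1, 2, 3, 2, 4, 2, 5], [3, 3, 1, 1, 2, 2, 4, 4, 5, 5]]
  let cnt : List Int :=
    (PySem.List.pyRange 0 student.length 1).foldl (fun cnt i =>
      (PySem.List.pyRange 0 answers.length 1).foldl (fun cnt j =>
        if PySem.List.pyGetD answers j 0 =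
            PySem.List.pyGetD (PySem.List.pyGetD student i [])
              (PySem.Int.mod j ((PySem.List.pyGetD student i []).length : Int)) 0
        then PySem.List.pySetD cnt i (PySem.List.pyGetD cnt i 0 + 1) else cnt) cnt) [0, 0, 0]
  (PySem.List.pyRange 0 3 1).foldl (fun ans i =>
    match PySem.List.max? cnt (fun x => x) with
    | some m => if m = PySem.List.pyGetD cnt i 0 then ans ++ [i + 1] else ans
    | none => ans) []

-- ===== PORT B =====
-- Port of B: one fold over enumerate(answers) builds the frequency dict keyed by
-- (j % 40, a); cnt is computed per pattern by summing 40 dict lookups; winners are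
-- the indices whose count equals max(cnt).  (max of the nonempty 3-list never returns
-- none; the none branch only makes the match total.)
def solution_alt (answers : List Int) : List Int :=
  let freq : PySem.Dict (Int × Int) Int :=
    (PySem.List.enumerate answers 0).foldl
      (fun d ja =>
        d.insert (PySem.Int.mod ja.1 40, ja.2)
          (d.getD (PySem.Int.mod ja.1 40, ja.2) 0 + 1)) PySem.Dict.empty
  let patterns : List (List Int) := [[1, 2, 3, 4, 5], [2, 1, 2, 3, 2, 4, 2, 5], [3, 3, 1, 1, 2, 2, 4, 4, 5, 5]]
  let cnt : List Int := patterns.map (fun p =>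
    ((PySem.List.pyRange 0 40 1).map (fun k =>
      freq.getD (k, PySem.List.pyGetD p (PySem.Int.mod k (p.length : Int)) 0) 0)).sum)
  match PySem.List.max? cnt (fun x => x) with
  | some best =>
      ((PySem.List.pyRange 0 3 1).filter (fun i => PySem.List.pyGetD cnt i 0 == best)).map
        (fun i => i + 1)
  | none => []

-- ===== PRECONDITION & SPEC =====
def Spec_solution (answers : List Int) (out : List Int) : Prop := out = solution_alt answers
instance (answers : List Int) (out : List Int) : Decidable (Spec_solution answers out) := by unfold Spec_solution; infer_instance

-- ===== CLAIM (what is proved, stated in full; the proofs are below) =====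
def Claim_equal_solution : Prop := ∀ (answers : List Int), Dom_solution answers → Spec_solution answers (solution answers)

-- ===== LEMMAS AND PROOFS =====

-- common specification of both programs' counters: number of positions of `l`
-- (starting at global index `j`) matching the cyclic pattern `pat`
def cspec (pat : List Int) : Nat → List Int → Int
  | _, [] => 0
  | j, a :: rest => (if a = pat.getD (j % pat.length) 0 then 1 else 0) + cspec pat (j + 1) rest

lemma cspec_append (pat : List Int) (y : Int) : ∀ (ys : List Int) (j : Nat),
    cspec pat j (ys ++ [y]) =
      cspec pat j ys + (if y = pat.getD ((j + ys.length) % pat.length) 0 then 1 else 0) := by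
  intro ys
  induction ys with
  | nil => intro j; simp [cspec]
  | cons a rest ih =>
      intro j
      simp only [List.cons_append, cspec, ih (j + 1), List.length_cons]
      have h2 : j + 1 + rest.length = j + (rest.length + 1) := by omega
      rw [h2]; ring_nf

-- A's inner loop, restated over Nat indices: it adds the match count to cnt[i]
lemma inner_loop (pat : List Int) (i : Nat) : ∀ (l : List Int) (cnt : List Int), i < cnt.length →
    (List.range l.length).foldl
      (fun c k => if l.getD k 0 = pat.getD (k % pat.length) 0
                  then c.set i (c.getD i 0 + 1) else c) cnt
    = cnt.set i (cnt.getD i 0 + cspec pat 0 l) := by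
  intro l
  induction l using List.reverseRecOn with
  | nil =>
      intro cnt hi
      simp [cspec, List.getD_eq_getElem?_getD, List.getElem?_eq_getElem hi]
  | append_singleton ys y ih =>
      intro cnt hi
      rw [List.length_append, List.length_singleton, List.range_succ, List.foldl_append]
      have hcong := PySem.List.foldl_congr_mem
        (l := List.range ys.length) (init := cnt)
        (f := fun c k => if (ys ++ [y]).getD k 0 = pat.getD (k % pat.length) 0 then c.set i (c.getD i 0 + 1) else c)
        (g := fun c k => if ys.getD k 0 = pat.getD (k % pat.length) 0 then c.set i (c.getD i 0 + 1) else c)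
        (by intro acc k hk
            simp only [List.getD_append _ _ _ _ (List.mem_range.mp hk)])
      rw [hcong, ih cnt hi, cspec_append]
      have hgy : (ys ++ [y]).getD ys.length 0 = y := by
        simp [List.getD_eq_getElem?_getD]
      have hgset : (cnt.set i (cnt.getD i 0 + cspec pat 0 ys)).getD i 0 = cnt.getD i 0 + cspec pat 0 ys := by
        simp [List.getD_eq_getElem?_getD, List.getElem?_set_self', List.getElem?_eq_getElem hi]
      simp only [List.foldl_cons, List.foldl_nil, hgy, hgset, Nat.zero_add]
      split_ifs with h
      · rw [List.set_set, add_assoc]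
      · rw [add_zero]

-- bridge: A's pyRange/pyGetD/pySetD inner loop equals the Nat-indexed loop above
lemma A_inner (answers pat : List Int) (i : Nat) (cnt : List Int) (hi : i < cnt.length) :
    (PySem.List.pyRange 0 (answers.length : Int) 1).foldl
      (fun c j => if PySem.List.pyGetD answers j 0 =
            PySem.List.pyGetD pat (PySem.Int.mod j (pat.length : Int)) 0
        then PySem.List.pySetD c (i : Int) (PySem.List.pyGetD c (i : Int) 0 + 1) else c) cnt
    = cnt.set i (cnt.getD i 0 + cspec pat 0 answers) := by
  rw [PySem.List.pyRange_one, List.foldl_map]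
  rw [show ((answers.length : Int) - 0).toNat = answers.length by omega]
  have hcong := PySem.List.foldl_congr_mem
    (l := List.range answers.length) (init := cnt)
    (f := fun c (k : Nat) => if PySem.List.pyGetD answers ((0:Int) + (k:Int)) 0 =
            PySem.List.pyGetD pat (PySem.Int.mod ((0:Int) + (k:Int)) (pat.length : Int)) 0
        then PySem.List.pySetD c ((i:Nat) : Int) (PySem.List.pyGetD c ((i:Nat) : Int) 0 + 1) else c)
    (g := fun c k => if answers.getD k 0 = pat.getD (k % pat.length) 0
                     then c.set i (c.getD i 0 + 1) else c)
    (by intro acc k hk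
        have mk : PySem.Int.mod ((k:Int)) (pat.length : Int) = ((k % pat.length : Nat) : Int) :=
          PySem.Int.mod_natCast k pat.length
        simp only [zero_add, mk, PySem.List.pyGetD_natCast, PySem.List.pySetD_natCast])
  rw [hcong]
  exact inner_loop pat i answers cnt hi

-- A computed in closed form over the three counters
lemma A_eval (answers : List Int) :
    solution answers =
      ((if max (max (cspec [1,2,3,4,5] 0 answers) (cspec [2,1,2,3,2,4,2,5] 0 answers)) (cspec [3,3,1,1,2,2,4,4,5,5] 0 answers) = cspec [1,2,3,4,5] 0 answers then [1] else []) ++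
       (if max (max (cspec [1,2,3,4,5] 0 answers) (cspec [2,1,2,3,2,4,2,5] 0 answers)) (cspec [3,3,1,1,2,2,4,4,5,5] 0 answers) = cspec [2,1,2,3,2,4,2,5] 0 answers then [2] else []) ++
       (if max (max (cspec [1,2,3,4,5] 0 answers) (cspec [2,1,2,3,2,4,2,5] 0 answers)) (cspec [3,3,1,1,2,2,4,4,5,5] 0 answers) = cspec [3,3,1,1,2,2,4,4,5,5] 0 answers then [3] else [])) := by
  unfold solution
  have hr3 : PySem.List.pyRange 0 (3:Int) 1 = [0, 1, 2] := by decide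
  have g0 : PySem.List.pyGetD ([[1,2,3,4,5],[2,1,2,3,2,4,2,5],[3,3,1,1,2,2,4,4,5,5]] : List (List Int)) (0:Int) [] = [1,2,3,4,5] := by decide
  have g1 : PySem.List.pyGetD ([[1,2,3,4,5],[2,1,2,3,2,4,2,5],[3,3,1,1,2,2,4,4,5,5]] : List (List Int)) (1:Int) [] = [2,1,2,3,2,4,2,5] := by decide
  have g2 : PySem.List.pyGetD ([[1,2,3,4,5],[2,1,2,3,2,4,2,5],[3,3,1,1,2,2,4,4,5,5]] : List (List Int)) (2:Int) [] = [3,3,1,1,2,2,4,4,5,5] := by decide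
  norm_num [hr3, g0, g1, g2, List.foldl_cons, List.foldl_nil]
  have h0 := A_inner answers [1,2,3,4,5] 0 [0,0,0] (by norm_num)
  norm_num at h0
  rw [h0]
  have h1 := A_inner answers [2,1,2,3,2,4,2,5] 1 [cspec [1,2,3,4,5] 0 answers, 0, 0] (by norm_num)
  norm_num [List.set, List.getD] at h1
  rw [h1]
  have h2 := A_inner answers [3,3,1,1,2,2,4,4,5,5] 2 [cspec [1,2,3,4,5] 0 answers, cspec [2,1,2,3,2,4,2,5] 0 answers, 0] (by norm_num)
  norm_num [List.set, List.getD] at h2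
  rw [h2]
  norm_num [PySem.List.max?_id_cons, PySem.List.pyGetD, show Int.toNat 0 = 0 from rfl,
    show Int.toNat 1 = 1 from rfl, show Int.toNat 2 = 2 from rfl]
  split_ifs <;> simp_all

-- an indicator summed over List.range n vanishes when the hot index is ≥ n …
lemma sum_ind_ge : ∀ (n r : Nat) (c : Int), n ≤ r →
    ((List.range n).map (fun k => if k = r then c else 0)).sum = 0 := by
  intro n
  induction n with
  | zero => intro r c _; simp
  | succ n ih =>
      intro r c h
      rw [List.range_succ, List.map_append, List.sum_append, ih r c (by omega)]
      have : n ≠ r := by omega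
      simp [this]

-- … and picks out c when it is < n
lemma sum_ind : ∀ (n r : Nat) (c : Int), r < n →
    ((List.range n).map (fun k => if k = r then c else 0)).sum = c := by
  intro n
  induction n with
  | zero => intro r c h; omega
  | succ n ih =>
      intro r c h
      rw [List.range_succ, List.map_append, List.sum_append]
      by_cases hr : r = n
      · subst hr; rw [sum_ind_ge r r c (le_refl r)]; simp
      · rw [ih r c (by omega)]
        have hne : n ≠ r := fun he => hr he.symm
        simp [hne]

-- counting on a cons, cast to Int
lemma count_cons_pair (x : Int × Int) (m : List (Int × Int)) (v : Int × Int) :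
    (((x :: m).count v : Nat) : Int) = ((m.count v : Nat) : Int) + (if x = v then 1 else 0) := by
  rw [List.count_cons]
  by_cases h : x = v
  · simp [h]
  · simp [h]

-- the 40 index lookups of B's per-pattern sum count exactly the matches cspec counts
lemma count_sum (p : List Int) (hd : p.length ∣ 40) : ∀ (l : List Int) (j : Nat),
    ((List.range 40).map (fun k =>
      ((((PySem.List.enumerate l (j : Int)).map (fun ja => (PySem.Int.mod ja.1 40, ja.2))).count
        (((k : Nat) : Int), PySem.List.pyGetD p (PySem.Int.mod ((k : Nat) : Int) (p.length : Int)) 0) : Nat) : Int))).sum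
    = cspec p j l := by
  intro l
  induction l with
  | nil =>
      intro j
      simp [PySem.List.enumerate_nil, cspec, List.map_const']
  | cons a rest ih =>
      intro j
      have hj1 : (j : Int) + 1 = ((j + 1 : Nat) : Int) := by push_cast; ring
      have hmod : PySem.Int.mod (j : Int) 40 = ((j % 40 : Nat) : Int) := PySem.Int.mod_natCast j 40
      simp only [PySem.List.enumerate_cons, hj1, List.map_cons, count_cons_pair, hmod,
        Prod.mk.injEq, Nat.cast_inj]
      rw [PySem.List.sum_map_add_int, ih (j + 1)]
      have hind : (List.range 40).map (fun k =>
            (if j % 40 = k ∧ a = PySem.List.pyGetD p (PySem.Int.mod ((k : Nat) : Int) (p.length : Int)) 0 then (1:Int) else 0))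
          = (List.range 40).map (fun k =>
            (if k = j % 40 then (if a = PySem.List.pyGetD p (PySem.Int.mod (((j % 40 : Nat)) : Int) (p.length : Int)) 0 then (1:Int) else 0) else 0)) := by
        refine List.map_congr_left (fun k _ => ?_)
        by_cases hk : k = j % 40
        · subst hk; simp
        · have hk2 : ¬ (j % 40 = k) := fun he => hk he.symm
          simp [hk, hk2]
      rw [hind, sum_ind 40 (j % 40) _ (Nat.mod_lt j (by omega))]
      have hval : PySem.List.pyGetD p (PySem.Int.mod (((j % 40 : Nat)) : Int) (p.length : Int)) 0
          = p.getD (j % p.length) 0 := by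
        rw [PySem.Int.mod_natCast, PySem.List.pyGetD_natCast, Nat.mod_mod_of_dvd j hd]
      rw [hval]
      simp only [cspec]
      ring

-- B's dict, read at any key, is the count of that key among the (j % 40, a) pairs
lemma freq_getD_gen (d : PySem.Dict (Int × Int) Int) : ∀ (l : List (Int × Int)) (v : Int × Int),
    ((l.foldl (fun d ja =>
        d.insert (PySem.Int.mod ja.1 40, ja.2)
          (d.getD (PySem.Int.mod ja.1 40, ja.2) 0 + 1)) d).getD v 0)
    = d.getD v 0 + ((l.map (fun ja => (PySem.Int.mod ja.1 40, ja.2))).count v : Int) := by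
  have h : ∀ (l : List (Int × Int)),
      l.foldl (fun d ja =>
        d.insert (PySem.Int.mod ja.1 40, ja.2)
          (d.getD (PySem.Int.mod ja.1 40, ja.2) 0 + 1)) d
      = (l.map (fun ja => (PySem.Int.mod ja.1 40, ja.2))).foldl
          (fun d x => d.insert x (d.getD x 0 + 1)) d := by
    intro l; rw [List.foldl_map]
  intro l v
  rw [h l, PySem.Dict.getD_foldl_insert_add_one]

-- B's winner selection over a literal 3-list of counters, in closed form
lemma sel_b (c1 c2 c3 : Int) :
    (match PySem.List.max? [c1, c2, c3] (fun x => x) with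
     | some best =>
         (([0, 1, 2] : List Int).filter (fun i => PySem.List.pyGetD [c1, c2, c3] i 0 == best)).map
           (fun i => i + 1)
     | none => ([] : List Int))
    = ((if c1 = max (max c1 c2) c3 then [1] else []) ++
       (if c2 = max (max c1 c2) c3 then [2] else []) ++
       (if c3 = max (max c1 c2) c3 then [3] else [])) := by
  have hmax : PySem.List.max? [c1, c2, c3] (fun x => x) = some (max (max c1 c2) c3) := by
    rw [PySem.List.max?_id_cons]; simp [List.foldl_cons, List.foldl_nil]
  have g0 : PySem.List.pyGetD [c1, c2, c3] (0:Int) 0 = c1 := by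
    simp [PySem.List.pyGetD, PySem.List.pyGet?, PySem.List.pyIdx?]
  have g1 : PySem.List.pyGetD [c1, c2, c3] (1:Int) 0 = c2 := by
    simp [PySem.List.pyGetD, PySem.List.pyGet?, PySem.List.pyIdx?]
  have g2 : PySem.List.pyGetD [c1, c2, c3] (2:Int) 0 = c3 := by
    simp [PySem.List.pyGetD, PySem.List.pyGet?, PySem.List.pyIdx?]
  rw [hmax]
  simp only [List.filter_cons, List.filter_nil, g0, g1, g2, beq_iff_eq]
  clear hmax g0 g1 g2
  split_ifs <;> simp

-- B computed in the same closed form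
lemma B_eval (answers : List Int) :
    solution_alt answers =
      ((if cspec [1,2,3,4,5] 0 answers = max (max (cspec [1,2,3,4,5] 0 answers) (cspec [2,1,2,3,2,4,2,5] 0 answers)) (cspec [3,3,1,1,2,2,4,4,5,5] 0 answers) then [1] else []) ++
       (if cspec [2,1,2,3,2,4,2,5] 0 answers = max (max (cspec [1,2,3,4,5] 0 answers) (cspec [2,1,2,3,2,4,2,5] 0 answers)) (cspec [3,3,1,1,2,2,4,4,5,5] 0 answers) then [2] else []) ++
       (if cspec [3,3,1,1,2,2,4,4,5,5] 0 answers = max (max (cspec [1,2,3,4,5] 0 answers) (cspec [2,1,2,3,2,4,2,5] 0 answers)) (cspec [3,3,1,1,2,2,4,4,5,5] 0 answers) then [3] else [])) := by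
  unfold solution_alt
  simp only [List.map_cons, List.map_nil]
  have hsum : ∀ (p : List Int), p.length ∣ 40 →
      ((PySem.List.pyRange 0 40 1).map (fun k =>
        (((PySem.List.enumerate answers 0).foldl
          (fun d ja =>
            d.insert (PySem.Int.mod ja.1 40, ja.2)
              (d.getD (PySem.Int.mod ja.1 40, ja.2) 0 + 1)) PySem.Dict.empty).getD
          (k, PySem.List.pyGetD p (PySem.Int.mod k (p.length : Int)) 0) 0))).sum
      = cspec p 0 answers := by
    intro p hd
    rw [show (PySem.List.pyRange 0 40 1) = (List.range 40).map (fun k : Nat => ((k : Nat) : Int)) by decide]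
    rw [List.map_map]
    have hc := count_sum p hd answers 0
    simp only [Nat.cast_zero] at hc
    rw [← hc]
    refine congrArg List.sum (List.map_congr_left (fun k _ => ?_))
    simp only [Function.comp]
    rw [freq_getD_gen]
    simp [PySem.Dict.getD_empty]
  rw [hsum [1,2,3,4,5] (by norm_num), hsum [2,1,2,3,2,4,2,5] (by norm_num),
      hsum [3,3,1,1,2,2,4,4,5,5] (by norm_num)]
  rw [show (PySem.List.pyRange 0 3 1) = [0, 1, 2] by decide]
  exact sel_b _ _ _

-- ===== VERDICT (by name: the statement is the Claim_ definition above) =====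
theorem solution_spec : Claim_equal_solution := by
  intro answers _
  unfold Spec_solution
  rw [A_eval, B_eval]
  simp only [eq_comm]
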